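-- pv_equiv track=rewrite | github.com/AyuKamakin/Metrology_HW | main.py | split_array_by_range
-- ===== SOURCE A (Python) =====
-- def split_array_by_range(content: list, max_range):
--     result = []
--     array = content.copy()
--     array = sorted(array)
--     while len(array) != 0:
--         array = sorted(array)
--         result.append([])
--         result[len(result) - 1].append(array[0])
--         array.pop(0)
--         while (
--                 max(result[len(result) - 1]) - min(result[len(result) - 1]) <= max_range
--                 and len(array) != 0
--         ):
--             result[len(result) - 1].append(array[0])
--             array.pop(0)
--         if (
--                 max(result[len(result) - 1]) - min(result[len(result) - 1]) > max_range
--                 and len(result[len(result) - 1]) != 1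
--         ):
--             array.append(result[len(result) - 1][-1])
--             result[len(result) - 1].pop(-1)
--
--     if len(result[-1]) == 1:
--         result[-2].append(result[-1][0])
--         result.remove(result[-1])
--     return result
-- ===== SOURCE B (Python) =====
-- def split_array_by_range(content: list, max_range):
--     # Sort once, then a single forward sweep: start a new bucket whenever the
--     # next value exceeds the current bucket's first value by more than max_range.
--     groups = []
--     cur = []
--     for v in sorted(content):
--         if cur and v - cur[0] > max_range:
--             groups.append(cur)
--             cur = [v]
--         else:
--             cur.append(v)
--     if cur:
--         groups.append(cur)
--     # never leave a final singleton bucket: fold it into the previous bucket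
--     if len(groups) >= 2 and len(groups[-1]) == 1:
--         groups[-2].append(groups.pop()[0])
--     return groups
-- ===== Notes on version B (the rewrite author's own statement) =====
-- stated objective: faster
-- what changed: A re-sorts the remaining array on every outer iteration and grows each bucket by repeated max/min/pop/push-back on mutable lists; B sorts once and forms the buckets in a single forward sweep with a current-bucket accumulator, then folds a trailing singleton into the previous bucket.
-- intended difference: When max_range < 0 and the maximum value occurs at least three times, every bucket is a singleton and A's final result.remove(result[-1]) deletes the FIRST bucket equal to the last one, returning a list that still ends in a singleton (e.g. [[2,2],[2]] for ([2,2,2],-1)); B merges the last singleton into the previous bucket ([[2],[2,2]]), which is what the final merge step is evidently meant to do. — e.g. on split_array_by_range([2, 2, 2], -1): A returns [[2, 2], [2]], B returns [[2], [2, 2]]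
import Mathlib
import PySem

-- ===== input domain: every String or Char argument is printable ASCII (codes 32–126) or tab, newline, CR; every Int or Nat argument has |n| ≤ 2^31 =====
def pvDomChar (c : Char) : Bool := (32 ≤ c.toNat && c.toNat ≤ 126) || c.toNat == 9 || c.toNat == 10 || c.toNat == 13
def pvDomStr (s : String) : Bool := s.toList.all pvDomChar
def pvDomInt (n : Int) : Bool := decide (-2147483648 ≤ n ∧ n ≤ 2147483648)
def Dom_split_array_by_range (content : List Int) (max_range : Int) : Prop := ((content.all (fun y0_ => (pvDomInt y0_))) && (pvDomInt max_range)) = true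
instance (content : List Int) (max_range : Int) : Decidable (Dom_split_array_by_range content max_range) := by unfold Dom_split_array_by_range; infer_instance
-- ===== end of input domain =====

-- B replaces A's repeated re-sorting / pop / push-back loop by one sort followed by a single
-- forward sweep that closes a bucket when the next value is more than max_range above the
-- bucket's first value (objective: faster). Return-value equivalence only: A also mutates
-- nothing observable (it works on a copy of `content`).

-- ===== PORT A =====
-- Python max(g) / min(g); g is always nonempty where A evaluates them.
def pymax (g : List Int) : Int := (PySem.List.max? g (fun y => y)).getD 0
def pymin (g : List Int) : Int := (PySem.List.min? g (fun y => y)).getD 0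

-- A's inner while loop: append array[0] to the group while max-min ≤ max_range and array ≠ [].
def innerA (m : Int) (group : List Int) (array : List Int) : List Int × List Int :=
  match array with
  | [] => (group, [])
  | a :: rest =>
    if pymax group - pymin group ≤ m then innerA m (group ++ [a]) rest
    else (group, a :: rest)

-- A's outer while loop; the fuel only makes the recursion structural (each pass removes at
-- least one element from `array`, so fuel = array.length never runs out).
def outerA (fuel : Nat) (m : Int) (result : List (List Int)) (array : List Int) : List (List Int) :=
  match fuel with
  | 0 => result
  | fuel + 1 =>
    match PySem.List.sorted array (fun y => y) false with
    | [] => result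
    | a0 :: rest =>
      let p := innerA m [a0] rest
      if pymax p.1 - pymin p.1 > m ∧ p.1.length ≠ 1 then
        outerA fuel m (result ++ [p.1.dropLast]) (p.2 ++ [PySem.List.pyGetD p.1 (-1) 0])
      else
        outerA fuel m (result ++ [p.1]) p.2

def split_array_by_range (content : List Int) (max_range : Int) : List (List Int) :=
  let array := PySem.List.sorted content (fun y => y) false
  let result := outerA array.length max_range [] array
  -- final block: if the last group is a singleton, append its element to result[-2] and
  -- remove the first group equal to result[-1]
  match PySem.List.pyGet? result (-1) with
  | none => []                                   -- IndexError (empty content); outside Pre_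
  | some lastg =>
    if lastg.length = 1 then
      match PySem.List.pyGet? result (-2) with
      | none => []                               -- IndexError (single singleton group); outside Pre_
      | some prev =>
        let result' := result.set (result.length - 2) (prev ++ [PySem.List.pyGetD lastg 0 0])
        match PySem.List.remove? result' lastg with
        | some r => r
        | none => []                             -- unreachable: lastg is still in result'
    else result

-- ===== PORT B =====
-- one step of B's sweep: start a new bucket when v is more than m above the bucket's first value
def stepB (m : Int) (st : List (List Int) × List Int) (v : Int) : List (List Int) × List Int :=
  match st.2 with
  | [] => (st.1, [v])
  | c0 :: _ => if v - c0 > m then (st.1 ++ [st.2], [v]) else (st.1, st.2 ++ [v])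

def split_array_by_range_alt (content : List Int) (max_range : Int) : List (List Int) :=
  let st := (PySem.List.sorted content (fun y => y) false).foldl (stepB max_range) ([], [])
  let groups := if st.2.isEmpty then st.1 else st.1 ++ [st.2]
  if 2 ≤ groups.length ∧ (groups.getLastD []).length = 1 then
    groups.dropLast.dropLast ++ [groups.dropLast.getLastD [] ++ [(groups.getLastD []).headI]]
  else groups

-- ===== PRECONDITION & SPEC =====
-- Pre_ excludes only the inputs with fewer than two elements, on which A raises IndexError
-- (result[-1] on an empty result, or result[-2] when result is the single singleton group).
def Pre_split_array_by_range (content : List Int) (max_range : Int) : Prop :=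
  2 ≤ content.length
instance (content : List Int) (max_range : Int) : Decidable (Pre_split_array_by_range content max_range) := by unfold Pre_split_array_by_range; infer_instance

def pvWitness_split_array_by_range : List Int × Int := ([0, 5], 3)

-- On lists whose maximum occurs at least three times and a negative max_range (every bucket is
-- then a singleton), A's final `result.remove(result[-1])` deletes the FIRST bucket equal to the
-- last one, leaving a singleton at the end; B folds the last singleton into the previous bucket,
-- which is what the final merge is evidently meant to do.
def D_split_array_by_range (content : List Int) (max_range : Int) : Prop :=
  max_range < 0 ∧ 3 ≤ content.count ((PySem.List.max? content (fun y => y)).getD 0)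
instance (content : List Int) (max_range : Int) : Decidable (D_split_array_by_range content max_range) := by unfold D_split_array_by_range; infer_instance

def Spec_split_array_by_range (content : List Int) (max_range : Int) (out : List (List Int)) : Prop := ¬ D_split_array_by_range content max_range → out = split_array_by_range_alt content max_range
instance (content : List Int) (max_range : Int) (out : List (List Int)) : Decidable (Spec_split_array_by_range content max_range out) := by unfold Spec_split_array_by_range; infer_instance

def pvDiffWitness_split_array_by_range : List Int × Int := ([2, 2, 2], -1)
def pvDiffWitnessOut_split_array_by_range : (List (List Int)) × (List (List Int)) :=
  ([[2, 2], [2]], [[2], [2, 2]])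

-- ===== CLAIM (what is proved, stated in full; the proofs are below) =====
def Claim_unchanged_split_array_by_range : Prop := ∀ (content : List Int) (max_range : Int), Dom_split_array_by_range content max_range → Pre_split_array_by_range content max_range → Spec_split_array_by_range content max_range (split_array_by_range content max_range)
def Claim_changed_split_array_by_range : Prop := Dom_split_array_by_range (pvDiffWitness_split_array_by_range.1) (pvDiffWitness_split_array_by_range.2) ∧ Pre_split_array_by_range (pvDiffWitness_split_array_by_range.1) (pvDiffWitness_split_array_by_range.2) ∧ D_split_array_by_range (pvDiffWitness_split_array_by_range.1) (pvDiffWitness_split_array_by_range.2) ∧ split_array_by_range (pvDiffWitness_split_array_by_range.1) (pvDiffWitness_split_array_by_range.2) = pvDiffWitnessOut_split_array_by_range.1 ∧ split_array_by_range_alt (pvDiffWitness_split_array_by_range.1) (pvDiffWitness_split_array_by_range.2) = pvDiffWitnessOut_split_array_by_range.2 ∧ pvDiffWitnessOut_split_array_by_range.1 ≠ pvDiffWitnessOut_split_array_by_range.2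
def Claim_exact_split_array_by_range : Prop := ∀ (content : List Int) (max_range : Int), Dom_split_array_by_range content max_range → Pre_split_array_by_range content max_range → D_split_array_by_range content max_range → split_array_by_range content max_range ≠ split_array_by_range_alt content max_range

-- ===== LEMMAS AND PROOFS =====

-- the buckets both programs compute on the sorted list: greedy split at the first value more
-- than m above the bucket's first value
def gspec (m : Int) : List Int → List (List Int)
  | [] => []
  | x :: s =>
    (x :: s.takeWhile (fun v => decide (v - x ≤ m))) ::
      gspec m (s.dropWhile (fun v => decide (v - x ≤ m)))
termination_by s => s.length
decreasing_by simpa using Nat.lt_succ_of_le (List.length_dropWhile_le _ _)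

theorem gspec_nil (m : Int) : gspec m [] = [] := by rw [gspec]
theorem gspec_cons (m x : Int) (s : List Int) :
    gspec m (x :: s) =
      (x :: s.takeWhile (fun v => decide (v - x ≤ m))) ::
        gspec m (s.dropWhile (fun v => decide (v - x ≤ m))) := by rw [gspec]

theorem gspec_flatten (m : Int) (s : List Int) : (gspec m s).flatten = s := by
  induction s using gspec.induct m with
  | case1 => simp [gspec_nil]
  | case2 x s ih => rw [gspec_cons]; simp only [List.flatten_cons, ih]
                    simp [List.takeWhile_append_dropWhile]

theorem gspec_ne_nil (m : Int) (s : List Int) : ∀ g ∈ gspec m s, g ≠ [] := by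
  induction s using gspec.induct m with
  | case1 => simp [gspec_nil]
  | case2 x s ih =>
    rw [gspec_cons]
    intro g hg
    rcases List.mem_cons.1 hg with rfl | hg
    · simp
    · exact ih g hg

theorem dropWhile_head_false {p : Int → Bool} {l : List Int} {a : Int} {t : List Int}
    (h : l.dropWhile p = a :: t) : p a = false := by
  induction l with
  | nil => simp at h
  | cons b l ih =>
    rw [List.dropWhile_cons] at h
    by_cases hb : p b
    · simp [hb] at h; exact ih h
    · simp [hb] at h; rcases h with ⟨rfl, -⟩; simpa using hb

-- if a non-last bucket is the singleton [y], the next remaining value h satisfies h - y > m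
theorem gspec_sing (m : Int) (s : List Int) :
    ∀ l₁ y l₂ h, gspec m s = l₁ ++ [y] :: l₂ → (l₂.flatten).head? = some h → ¬ (h - y ≤ m) := by
  induction s using gspec.induct m with
  | case1 => intro l₁ y l₂ h he; rw [gspec_nil] at he; simp at he
  | case2 x s ih =>
    intro l₁ y l₂ h he hh
    rw [gspec_cons] at he
    cases l₁ with
    | nil =>
      simp only [List.nil_append, List.cons.injEq] at he
      obtain ⟨he1, he2⟩ := he
      obtain ⟨hy, htw⟩ := he1
      have hfl : l₂.flatten = s.dropWhile (fun v => decide (v - x ≤ m)) := by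
        rw [← he2, gspec_flatten]
      rw [hfl] at hh
      cases hd : s.dropWhile (fun v => decide (v - x ≤ m)) with
      | nil => rw [hd] at hh; simp at hh
      | cons a t =>
        rw [hd] at hh
        simp only [List.head?_cons, Option.some.injEq] at hh
        have := dropWhile_head_false hd
        subst hy hh
        simpa using this
    | cons g l₁' =>
      simp only [List.cons_append, List.cons.injEq] at he
      exact ih l₁' y l₂ h he.2 hh

-- ===== B-side characterisation =====
theorem foldB_char (m : Int) (s : List Int) :
    ∀ (gs : List (List Int)) (x : Int) (t : List Int),
      (let st := s.foldl (stepB m) (gs, x :: t);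
        if st.2.isEmpty then st.1 else st.1 ++ [st.2]) =
      gs ++ ((x :: t) ++ s.takeWhile (fun v => decide (v - x ≤ m))) ::
        gspec m (s.dropWhile (fun v => decide (v - x ≤ m))) := by
  induction s with
  | nil => intro gs x t; simp [gspec_nil]
  | cons v s' ih =>
    intro gs x t
    simp only [List.foldl_cons]
    by_cases hv : v - x ≤ m
    · have hstep : stepB m (gs, x :: t) v = (gs, x :: (t ++ [v])) := by
        simp [stepB]; omega
      rw [hstep]
      have := ih gs x (t ++ [v])
      simp only [this]
      rw [List.takeWhile_cons, List.dropWhile_cons]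
      simp [hv]
    · have hstep : stepB m (gs, x :: t) v = (gs ++ [x :: t], [v]) := by
        simp [stepB]; omega
      rw [hstep]
      have := ih (gs ++ [x :: t]) v []
      simp only [this]
      rw [List.takeWhile_cons, List.dropWhile_cons]
      simp [hv, gspec_cons]

-- ===== A-side characterisation =====
theorem pymin_eq (x : Int) (t : List Int) (h : ∀ y ∈ t, x ≤ y) : pymin (x :: t) = x := by
  obtain ⟨M, hM⟩ : ∃ M, PySem.List.min? (x :: t) (fun y => y) = some M := by
    cases hc : PySem.List.min? (x :: t) (fun y => y) with
    | none => exact absurd ((PySem.List.min?_eq_none_iff _ _).1 hc) (by simp)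
    | some M => exact ⟨M, rfl⟩
  have hmem := PySem.List.min?_mem hM
  have hmin := PySem.List.min?_isMin hM
  have h1 : M ≤ x := hmin x (by simp)
  have h2 : x ≤ M := by
    rcases List.mem_cons.1 hmem with rfl | hm
    · exact le_refl _
    · exact h M hm
  simp [pymin, hM]; omega

theorem pymax_spec (x : Int) (t : List Int) :
    ∃ M, pymax (x :: t) = M ∧ M ∈ x :: t ∧ ∀ y ∈ x :: t, y ≤ M := by
  obtain ⟨M, hM⟩ : ∃ M, PySem.List.max? (x :: t) (fun y => y) = some M := by
    cases hc : PySem.List.max? (x :: t) (fun y => y) with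
    | none => exact absurd ((PySem.List.max?_eq_none_iff _ _).1 hc) (by simp)
    | some M => exact ⟨M, rfl⟩
  exact ⟨M, by simp [pymax, hM], PySem.List.max?_mem hM, PySem.List.max?_isMax hM⟩

theorem innerA_char (m x : Int) (hm : 0 ≤ m) :
    ∀ (arr t : List Int), (x :: (t ++ arr)).Pairwise (· ≤ ·) → (∀ y ∈ t, y - x ≤ m) →
      innerA m (x :: t) arr =
        match arr.dropWhile (fun v => decide (v - x ≤ m)) with
        | [] => (x :: (t ++ arr), [])
        | b :: d' => (x :: (t ++ arr.takeWhile (fun v => decide (v - x ≤ m)) ++ [b]), d') := by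
  intro arr
  induction arr with
  | nil => intro t hp ht; simp [innerA]
  | cons a rest ih =>
    intro t hp ht
    have hx : ∀ y ∈ t ++ a :: rest, x ≤ y := (List.pairwise_cons.1 hp).1
    have hxt : ∀ y ∈ t, x ≤ y := fun y hy => hx y (List.mem_append_left _ hy)
    have hmin : pymin (x :: t) = x := pymin_eq x t hxt
    obtain ⟨M, hMe, hMm, hMmax⟩ := pymax_spec x t
    have hcond : pymax (x :: t) - pymin (x :: t) ≤ m := by
      rw [hMe, hmin]
      rcases List.mem_cons.1 hMm with rfl | hMt
      · omega
      · have := ht M hMt; omega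
    have hstep : innerA m (x :: t) (a :: rest) = innerA m (x :: (t ++ [a])) rest := by
      simp [innerA, hcond]
    by_cases hQ : a - x ≤ m
    · have hp' : (x :: ((t ++ [a]) ++ rest)).Pairwise (· ≤ ·) := by
        rw [List.append_assoc]; simpa using hp
      have ht' : ∀ y ∈ t ++ [a], y - x ≤ m := by
        intro y hy
        rcases List.mem_append.1 hy with hy | hy
        · exact ht y hy
        · simp at hy; omega
      have hih := ih (t ++ [a]) hp' ht'
      rw [hstep, hih, List.dropWhile_cons, List.takeWhile_cons]
      cases hd : rest.dropWhile (fun v => decide (v - x ≤ m)) <;>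
        simp [hQ, List.append_assoc]
    · rw [hstep]
      have hgoal : innerA m (x :: (t ++ [a])) rest = (x :: (t ++ [a]), rest) := by
        cases rest with
        | nil => simp [innerA]
        | cons c r' =>
          have hxt' : ∀ z ∈ t ++ [a], x ≤ z := by
            intro z hz
            rcases List.mem_append.1 hz with hz | hz
            · exact hxt z hz
            · have hza : z = a := by simpa using hz
              subst hza; exact hx z (by simp)
          have hmin' : pymin (x :: (t ++ [a])) = x := pymin_eq _ _ hxt'
          obtain ⟨M', hM'e, hM'm, hM'max⟩ := pymax_spec x (t ++ [a])
          have haM : a ≤ M' := hM'max a (by simp)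
          have hnc : ¬ (pymax (x :: (t ++ [a])) - pymin (x :: (t ++ [a])) ≤ m) := by
            rw [hM'e, hmin']; omega
          simp [innerA, hnc]
      rw [hgoal, List.dropWhile_cons, List.takeWhile_cons]
      simp [hQ]

theorem outerA_eq (m : Int) :
    ∀ (fuel : Nat) (arr : List Int), arr.length ≤ fuel → ∀ result,
      outerA fuel m result arr = result ++ gspec m (PySem.List.sorted arr (fun y => y) false) := by
  intro fuel
  induction fuel with
  | zero =>
    intro arr hlen result
    have harr : arr = [] := List.eq_nil_of_length_eq_zero (Nat.le_zero.1 hlen)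
    subst harr
    have : PySem.List.sorted ([] : List Int) (fun y => y) false = [] := by
      rw [PySem.List.sorted_eq_nil_iff]
    rw [outerA, this, gspec_nil, List.append_nil]
  | succ fuel ih =>
    intro arr hlen result
    rw [outerA]
    cases hss : PySem.List.sorted arr (fun y => y) false with
    | nil => simp [gspec_nil]
    | cons x rest =>
      have hpair : (x :: rest).Pairwise (· ≤ ·) := by
        have := PySem.List.sorted_pairwise arr (fun y => y)
        rw [hss] at this
        simpa using this
      have hxrest : ∀ y ∈ rest, x ≤ y := (List.pairwise_cons.1 hpair).1
      have hrpair : rest.Pairwise (· ≤ ·) := (List.pairwise_cons.1 hpair).2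
      have hlen' : rest.length ≤ fuel := by
        have := PySem.List.length_sorted arr (fun y => y) false
        rw [hss] at this
        simp at this
        omega
      simp only []
      by_cases hm : 0 ≤ m
      · have hchar := innerA_char m x hm rest [] (by simpa using hpair) (by simp)
        cases hd : rest.dropWhile (fun v => decide (v - x ≤ m)) with
        | nil =>
          rw [hd] at hchar
          simp only [List.nil_append] at hchar
          have hall : ∀ y ∈ rest, y - x ≤ m := by
            intro y hy
            have htw : rest.takeWhile (fun v => decide (v - x ≤ m)) = rest := by
              have := List.takeWhile_append_dropWhile (p := fun v => decide (v - x ≤ m)) (l := rest)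
              rw [hd] at this
              simpa using this
            have : y ∈ rest.takeWhile (fun v => decide (v - x ≤ m)) := by rw [htw]; exact hy
            simpa using List.mem_takeWhile_imp this
          obtain ⟨M, hMe, hMm, hMmax⟩ := pymax_spec x rest
          have hmin := pymin_eq x rest hxrest
          have hcond : ¬(pymax (x :: rest) - pymin (x :: rest) > m ∧ (x :: rest).length ≠ 1) := by
            rw [hMe, hmin]
            rcases List.mem_cons.1 hMm with rfl | hMt
            · intro hc; omega
            · have := hall M hMt; intro hc; omega
          rw [hchar]
          simp only [hcond, if_false]
          rw [ih [] (by simp) (result ++ [x :: rest])]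
          have hnil : PySem.List.sorted ([] : List Int) (fun y => y) false = [] := by
            rw [PySem.List.sorted_eq_nil_iff]
          rw [hnil, gspec_nil, gspec_cons]
          have htw : rest.takeWhile (fun v => decide (v - x ≤ m)) = rest := by
            have := List.takeWhile_append_dropWhile (p := fun v => decide (v - x ≤ m)) (l := rest)
            rw [hd] at this
            simpa using this
          rw [htw, hd, gspec_nil]
          simp
        | cons b d' =>
          rw [hd] at hchar
          simp only [List.nil_append] at hchar
          have hbd : rest = rest.takeWhile (fun v => decide (v - x ≤ m)) ++ b :: d' := by
            conv_lhs => rw [← List.takeWhile_append_dropWhile (p := fun v => decide (v - x ≤ m)) (l := rest)]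
            rw [hd]
          have hbm : ¬ (b - x ≤ m) := by simpa using dropWhile_head_false hd
          have hmemrest : ∀ z ∈ rest.takeWhile (fun v => decide (v - x ≤ m)) ++ [b], x ≤ z := by
            intro z hz
            rcases List.mem_append.1 hz with hz | hz
            · exact hxrest z (by rw [hbd]; exact List.mem_append_left _ hz)
            · have : z = b := by simpa using hz
              subst this
              exact hxrest z (by rw [hbd]; exact List.mem_append_right _ (by simp))
          have hmin := pymin_eq x _ hmemrest
          obtain ⟨M, hMe, hMm, hMmax⟩ := pymax_spec x (rest.takeWhile (fun v => decide (v - x ≤ m)) ++ [b])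
          have hbM : b ≤ M := hMmax b (by simp)
          have hcond : pymax (x :: (rest.takeWhile (fun v => decide (v - x ≤ m)) ++ [b])) -
              pymin (x :: (rest.takeWhile (fun v => decide (v - x ≤ m)) ++ [b])) > m ∧
              (x :: (rest.takeWhile (fun v => decide (v - x ≤ m)) ++ [b])).length ≠ 1 := by
            constructor
            · rw [hMe, hmin]; omega
            · simp
          rw [hchar]
          rw [if_pos hcond]
          have hgrp : x :: (rest.takeWhile (fun v => decide (v - x ≤ m)) ++ [b]) =
              (x :: rest.takeWhile (fun v => decide (v - x ≤ m))) ++ [b] := by simp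
          have hdl : (x :: (rest.takeWhile (fun v => decide (v - x ≤ m)) ++ [b])).dropLast =
              x :: rest.takeWhile (fun v => decide (v - x ≤ m)) := by
            rw [hgrp, List.dropLast_concat]
          have hlast : PySem.List.pyGetD (x :: (rest.takeWhile (fun v => decide (v - x ≤ m)) ++ [b])) (-1) 0 = b := by
            rw [hgrp]
            exact PySem.List.pyGetD_neg_one_append_singleton ..
          rw [hdl, hlast]
          have hlen'' : (d' ++ [b]).length ≤ fuel := by
            have := congrArg List.length hbd
            simp at this ⊢
            omega
          rw [ih (d' ++ [b]) hlen'' (result ++ [x :: rest.takeWhile (fun v => decide (v - x ≤ m))])]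
          have hsortdb : PySem.List.sorted (d' ++ [b]) (fun y => y) false = b :: d' := by
            apply PySem.List.sorted_id_eq_of_perm_of_pairwise
            · exact (List.perm_append_singleton b d').symm
            · have hsub : (b :: d').Sublist rest := by
                rw [hbd]
                exact List.sublist_append_right _ _
              exact hpair.sublist (hsub.cons _)
          rw [hsortdb]
          conv_rhs => rw [gspec_cons, hd]
          simp
      · replace hm : m < 0 := by omega
        have hinner : innerA m [x] rest = ([x], rest) := by
          cases rest with
          | nil => simp [innerA]
          | cons c r' =>
            have hmin := pymin_eq x ([] : List Int) (by simp)
            obtain ⟨M, hMe, hMm, hMmax⟩ := pymax_spec x ([] : List Int)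
            have hMx : M = x := by simpa using hMm
            have hnc : ¬ (pymax [x] - pymin [x] ≤ m) := by
              rw [hMe, hmin, hMx]; omega
            simp [innerA, hnc]
        rw [hinner]
        simp only []
        have hcond : ¬(pymax [x] - pymin [x] > m ∧ ([x] : List Int).length ≠ 1) := by
          simp
        simp only [hcond, if_false]
        rw [ih rest hlen' (result ++ [[x]])]
        rw [PySem.List.sorted_eq_self_of_pairwise rest (fun y => y) (by simpa using hrpair)]
        rw [gspec_cons]
        cases rest with
        | nil => simp [gspec_nil]
        | cons c r' =>
          have hc : ¬ (c - x ≤ m) := by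
            have := hxrest c (by simp)
            omega
          rw [List.takeWhile_cons, List.dropWhile_cons]
          simp [hc]

-- A as final merge over the common buckets
theorem split_eq (content : List Int) (m : Int) :
    split_array_by_range content m =
      (let result := gspec m (PySem.List.sorted content (fun y => y) false);
       match PySem.List.pyGet? result (-1) with
       | none => []
       | some lastg =>
         if lastg.length = 1 then
           match PySem.List.pyGet? result (-2) with
           | none => []
           | some prev =>
             let result' := result.set (result.length - 2) (prev ++ [PySem.List.pyGetD lastg 0 0])
             match PySem.List.remove? result' lastg with
             | some r => r
             | none => []
         else result) := by
  unfold split_array_by_range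
  dsimp only
  rw [outerA_eq m (PySem.List.sorted content (fun y => y) false).length
      (PySem.List.sorted content (fun y => y) false) le_rfl []]
  rw [PySem.List.sorted_sorted]
  rw [List.nil_append]

theorem alt_eq (content : List Int) (m : Int) :
    split_array_by_range_alt content m =
      (let groups := gspec m (PySem.List.sorted content (fun y => y) false);
       if 2 ≤ groups.length ∧ (groups.getLastD []).length = 1 then
         groups.dropLast.dropLast ++ [groups.dropLast.getLastD [] ++ [(groups.getLastD []).headI]]
       else groups) := by
  have hg : ∀ s : List Int,
      (if (s.foldl (stepB m) (([], []) : List (List Int) × List Int)).2.isEmpty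
        then (s.foldl (stepB m) (([], []) : List (List Int) × List Int)).1
        else (s.foldl (stepB m) (([], []) : List (List Int) × List Int)).1 ++
          [(s.foldl (stepB m) (([], []) : List (List Int) × List Int)).2]) = gspec m s := by
    intro s
    cases s with
    | nil => simp [gspec_nil]
    | cons x rest =>
      simp only [List.foldl_cons]
      have hstep : stepB m ([], []) x = ([], [x]) := rfl
      rw [hstep]
      have h := foldB_char m rest [] x []
      dsimp only at h
      rw [h, gspec_cons]
      simp
  unfold split_array_by_range_alt
  dsimp only
  rw [hg]

theorem set_append_length {α : Type} (u : List α) (p : α) (w : List α) (v : α) :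
    (u ++ p :: w).set u.length v = u ++ v :: w := by
  induction u with
  | nil => rfl
  | cons a u ih => simp [List.set_cons_succ, ih]

theorem remove?_append_self {α : Type} [BEq α] [LawfulBEq α] (l : List α) (v : α)
    (h : v ∉ l) : PySem.List.remove? (l ++ [v]) v = some l := by
  induction l with
  | nil => simp
  | cons a l ih =>
    have hne : a ≠ v := by rintro rfl; exact h (by simp)
    rw [List.cons_append, PySem.List.remove?_cons_of_ne _ hne]
    rw [ih (fun hm => h (by simp [hm]))]
    rfl

-- the key fact: if an earlier bucket equals the final singleton bucket [x], then max_range < 0,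
-- x is the maximum and it occurs at least three times
theorem no_dup (m : Int) (ss : List Int) (hpair : ss.Pairwise (· ≤ ·))
    (G'' : List (List Int)) (prev : List Int) (x : Int)
    (h : gspec m ss = G'' ++ [prev, [x]]) (hmem : [x] ∈ G'') :
    m < 0 ∧ 3 ≤ ss.count x ∧ ∀ y ∈ ss, y ≤ x := by
  obtain ⟨i₁, i₂, hsplit⟩ := List.append_of_mem hmem
  have hG : gspec m ss = i₁ ++ [x] :: (i₂ ++ [prev, [x]]) := by rw [h, hsplit]; simp
  have hwval : (i₂ ++ [prev, [x]]).flatten = i₂.flatten ++ (prev ++ [x]) := by simp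
  have hssdec : ss = i₁.flatten ++ x :: (i₂.flatten ++ (prev ++ [x])) := by
    conv_lhs => rw [← gspec_flatten m ss, hG]
    simp
  set w := i₂.flatten ++ (prev ++ [x]) with hwdef
  have hwne : w ≠ [] := by simp [hwdef]
  obtain ⟨h0, w', hw0⟩ := List.exists_cons_of_ne_nil hwne
  have hhead : (i₂ ++ [prev, [x]]).flatten.head? = some h0 := by
    rw [hwval, hw0]; rfl
  have hnot := gspec_sing m ss i₁ x (i₂ ++ [prev, [x]]) h0 hG hhead
  have hpw : (x :: w).Pairwise (· ≤ ·) := by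
    have hsub : (x :: w).Sublist ss := by
      rw [hssdec]
      exact List.sublist_append_right _ _
    exact hpair.sublist hsub
  have hxle : ∀ y ∈ w, x ≤ y := (List.pairwise_cons.1 hpw).1
  have hwpair : w.Pairwise (· ≤ ·) := (List.pairwise_cons.1 hpw).2
  have hwform : w = (i₂.flatten ++ prev) ++ [x] := by simp [hwdef]
  have hlex : ∀ y ∈ i₂.flatten ++ prev, y ≤ x := by
    have hp := List.pairwise_append.1 (by rw [← hwform]; exact hwpair)
    intro y hy
    exact hp.2.2 y hy x (by simp)
  have hh0w : h0 ∈ w := by rw [hw0]; simp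
  have h0eq : h0 = x := by
    have h1 : x ≤ h0 := hxle h0 hh0w
    have h2 : h0 ≤ x := by
      have : h0 ∈ (i₂.flatten ++ prev) ++ [x] := by rw [← hwform]; exact hh0w
      rcases List.mem_append.1 this with hy | hy
      · exact hlex h0 hy
      · simp at hy; omega
    omega
  have hm : m < 0 := by
    subst h0eq
    simp at hnot
    omega
  refine ⟨hm, ?_, ?_⟩
  · have hprevne : prev ≠ [] := gspec_ne_nil m ss prev (by rw [h]; simp)
    obtain ⟨p0, hp0⟩ := List.exists_mem_of_ne_nil prev hprevne
    have hp0x : p0 = x := by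
      have h1 : x ≤ p0 := hxle p0 (by rw [hwform]; exact List.mem_append_left _ (List.mem_append_right _ hp0))
      have h2 : p0 ≤ x := hlex p0 (List.mem_append_right _ hp0)
      omega
    have hpc : 0 < prev.count x := List.count_pos_iff.2 (hp0x ▸ hp0)
    rw [hssdec, hwform]
    simp [List.count_append]
    omega
  · intro y hy
    rw [hssdec] at hy
    rcases List.mem_append.1 hy with hy | hy
    · have hp := List.pairwise_append.1 (by rw [← hssdec]; exact hpair)
      exact hp.2.2 y hy x (by simp)
    · rcases List.mem_cons.1 hy with rfl | hy
      · omega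
      · have : y ∈ (i₂.flatten ++ prev) ++ [x] := by rw [← hwform]; exact hy
        rcases List.mem_append.1 this with hy' | hy'
        · exact hlex y hy'
        · simp at hy'; omega

theorem pyGet?_neg_two {α : Type} (u : List α) (p q : α) :
    PySem.List.pyGet? (u ++ [p, q]) (-2) = some p := by
  have hlen : (u ++ [p, q]).length = u.length + 2 := by simp
  rw [PySem.List.pyGet?_neg_ofNat (u ++ [p, q]) 2 (by omega) (by omega)]
  rw [hlen]
  simp only [Nat.add_sub_cancel]
  rw [List.getElem?_append_right (by omega)]
  simp

-- for max_range < 0 every bucket is a singleton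
theorem gspec_neg (m : Int) (hm : m < 0) :
    ∀ s : List Int, s.Pairwise (· ≤ ·) → gspec m s = s.map (fun v => [v]) := by
  intro s
  induction s with
  | nil => intro _; simp [gspec_nil]
  | cons x t ih =>
    intro hp
    rw [gspec_cons]
    have htw : t.takeWhile (fun v => decide (v - x ≤ m)) = [] := by
      cases t with
      | nil => rfl
      | cons c r =>
        rw [List.takeWhile_cons]
        have hc : x ≤ c := (List.pairwise_cons.1 hp).1 c (by simp)
        have : ¬ (c - x ≤ m) := by omega
        simp [this]
    have hdw : t.dropWhile (fun v => decide (v - x ≤ m)) = t := by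
      have := List.takeWhile_append_dropWhile (p := fun v => decide (v - x ≤ m)) (l := t)
      rw [htw] at this
      simpa using this
    rw [htw, hdw, ih (List.pairwise_cons.1 hp).2]
    simp

theorem remove?_append_getLast? {α : Type} [BEq α] [LawfulBEq α] (l l₂ : List α) (v : α)
    (hv : v ∈ l) (hl₂ : l₂ ≠ []) :
    ∃ r, PySem.List.remove? (l ++ l₂) v = some r ∧ r.getLast? = l₂.getLast? := by
  induction l with
  | nil => simp at hv
  | cons a t ih =>
    by_cases ha : a = v
    · subst ha
      refine ⟨t ++ l₂, by simp, ?_⟩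
      exact List.getLast?_append_of_ne_nil t hl₂
    · have hvt : v ∈ t := by
        rcases List.mem_cons.1 hv with rfl | h
        · exact absurd rfl ha
        · exact h
      obtain ⟨r, hr, hrl⟩ := ih hvt
      refine ⟨a :: r, ?_, ?_⟩
      · rw [List.cons_append, PySem.List.remove?_cons_of_ne _ ha, hr]
        rfl
      · have hrne : r ≠ [] := by
          intro hnil
          rw [hnil] at hrl
          simp only [List.getLast?_nil] at hrl
          exact hl₂ (List.getLast?_eq_none_iff.1 hrl.symm)
        rw [show a :: r = [a] ++ r from rfl, List.getLast?_append_of_ne_nil _ hrne, hrl]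

-- ===== VERDICT (by name: the statement is the Claim_ definition above) =====
theorem split_array_by_range_spec : Claim_unchanged_split_array_by_range := by
  intro content m hdom hpre hD
  unfold Pre_split_array_by_range at hpre
  rw [split_eq, alt_eq]
  dsimp only
  have hpair : (PySem.List.sorted content (fun y => y) false).Pairwise (· ≤ ·) := by
    simpa using PySem.List.sorted_pairwise content (fun y => y)
  have hperm : (PySem.List.sorted content (fun y => y) false).Perm content :=
    PySem.List.sorted_perm content (fun y => y) false
  have hlenss : (PySem.List.sorted content (fun y => y) false).length = content.length :=
    PySem.List.length_sorted content (fun y => y) false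
  set ss := PySem.List.sorted content (fun y => y) false with hssdef
  set G := gspec m ss with hGdef
  have hflat : G.flatten = ss := gspec_flatten m ss
  have hGne : G ≠ [] := by
    intro hnil
    rw [hnil] at hflat
    have hss0 : ss = [] := by simpa using hflat.symm
    rw [hss0] at hlenss
    simp at hlenss
    omega
  rcases (List.eq_nil_or_concat G).resolve_left hGne with ⟨G', lastg, hGsplit⟩
  rw [List.concat_eq_append] at hGsplit
  rw [hGsplit]
  rw [PySem.List.pyGet?_neg_one_append_singleton]
  dsimp only
  by_cases hlast1 : lastg.length = 1
  · obtain ⟨x, rfl⟩ := List.length_eq_one_iff.1 hlast1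
    rcases List.eq_nil_or_concat G' with rfl | ⟨G'', prev, hG'⟩
    · -- G = [[x]] : then ss has one element, contradicting 2 ≤ content.length
      exfalso
      rw [hGsplit] at hflat
      have hss1 : ss = [x] := by simpa using hflat.symm
      rw [hss1] at hlenss
      simp at hlenss
      omega
    · rw [List.concat_eq_append] at hG'
      subst hG'
      have hG2 : (G'' ++ [prev]) ++ [[x]] = G'' ++ [prev, [x]] := by simp
      rw [hG2]
      have hprevmem : prev ∈ G := by rw [hGsplit, hG2]; simp
      have hprevne : prev ≠ [] := gspec_ne_nil m ss prev (by rw [← hGdef]; exact hprevmem)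
      have hnotin : [x] ∉ G'' := by
        intro hmem
        obtain ⟨hm, hcnt, hmax⟩ := no_dup m ss hpair G'' prev x (by rw [← hGdef, hGsplit, hG2]) hmem
        apply hD
        unfold D_split_array_by_range
        refine ⟨hm, ?_⟩
        have hxss : x ∈ ss := by
          have : 0 < ss.count x := by omega
          exact List.count_pos_iff.1 this
        have hxc : x ∈ content := hperm.mem_iff.1 hxss
        obtain ⟨M, hM⟩ : ∃ M, PySem.List.max? content (fun y => y) = some M := by
          cases hc : PySem.List.max? content (fun y => y) with
          | none => exact absurd ((PySem.List.max?_eq_none_iff _ _).1 hc) (by rintro rfl; simp at hxc)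
          | some M => exact ⟨M, rfl⟩
        have hMx : M = x := by
          have h1 : x ≤ M := PySem.List.max?_isMax hM x hxc
          have h2 : M ≤ x := hmax M (hperm.mem_iff.2 (PySem.List.max?_mem hM))
          omega
        rw [hM, Option.getD_some, hMx]
        rw [← hperm.count_eq]
        exact hcnt
      -- A's value
      rw [if_pos hlast1]
      have hlenG : (G'' ++ [prev, [x]]).length = G''.length + 2 := by simp
      rw [pyGet?_neg_two]
      dsimp only
      rw [PySem.List.pyGetD_zero_cons]
      have hset : (G'' ++ [prev, [x]]).set ((G'' ++ [prev, [x]]).length - 2) (prev ++ [x]) =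
          (G'' ++ [prev ++ [x]]) ++ [[x]] := by
        rw [hlenG]
        simp only [Nat.add_sub_cancel]
        rw [set_append_length]
        simp
      rw [hset]
      have hnotin' : [x] ∉ G'' ++ [prev ++ [x]] := by
        intro hmem
        rcases List.mem_append.1 hmem with hmem | hmem
        · exact hnotin hmem
        · have heq : [x] = prev ++ [x] := by simpa using hmem
          have hpn : prev = [] := by
            have := congrArg List.length heq
            simp at this
            exact this
          exact hprevne hpn
      rw [remove?_append_self _ _ hnotin']
      -- B's value
      rw [if_pos ?_]
      · rw [show (G'' ++ [prev, [x]]) = (G'' ++ [prev]) ++ [[x]] by simp]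
        rw [List.dropLast_concat, List.dropLast_concat]
        rw [List.getLastD_concat, List.getLastD_concat]
        simp
      · constructor
        · simp
        · rw [show (G'' ++ [prev, [x]]) = (G'' ++ [prev]) ++ [[x]] by simp, List.getLastD_concat]
          simp
  · rw [if_neg hlast1]
    have hcond : ¬(2 ≤ (G' ++ [lastg]).length ∧ ((G' ++ [lastg]).getLastD []).length = 1) := by
      rw [List.getLastD_concat]
      intro hc
      exact hlast1 hc.2
    rw [if_neg hcond]

theorem split_array_by_range_changed : Claim_changed_split_array_by_range := by
  unfold Claim_changed_split_array_by_range; decide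

theorem split_array_by_range_tight : Claim_exact_split_array_by_range := by
  intro content m hdom hpre hD
  obtain ⟨hm, hcnt⟩ := hD
  unfold Pre_split_array_by_range at hpre
  rw [split_eq, alt_eq]
  dsimp only
  have hpair : (PySem.List.sorted content (fun y => y) false).Pairwise (· ≤ ·) := by
    simpa using PySem.List.sorted_pairwise content (fun y => y)
  have hperm : (PySem.List.sorted content (fun y => y) false).Perm content :=
    PySem.List.sorted_perm content (fun y => y) false
  set ss := PySem.List.sorted content (fun y => y) false with hssdef
  set M := (PySem.List.max? content (fun y => y)).getD 0 with hMdef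
  have hcntss : 3 ≤ ss.count M := by rw [hperm.count_eq]; exact hcnt
  have hlen3 : 3 ≤ ss.length := le_trans hcntss (List.count_le_length)
  -- ss = d ++ [p₂, p₁]
  have hssne : ss ≠ [] := by intro h; rw [h] at hlen3; simp at hlen3
  rcases (List.eq_nil_or_concat ss).resolve_left hssne with ⟨ss', p₁, hss1⟩
  rw [List.concat_eq_append] at hss1
  have hss'ne : ss' ≠ [] := by
    intro h
    rw [h] at hss1
    rw [hss1] at hlen3
    simp at hlen3
  rcases (List.eq_nil_or_concat ss').resolve_left hss'ne with ⟨d, p₂, hss2⟩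
  rw [List.concat_eq_append] at hss2
  subst hss2
  -- p₁ is the maximum M, and M still occurs in d
  have hMmem : M ∈ ss := by
    have : 0 < ss.count M := by omega
    exact List.count_pos_iff.1 this
  have hMmax : ∀ y ∈ ss, y ≤ M := by
    intro y hy
    have hyc : y ∈ content := hperm.mem_iff.1 hy
    obtain ⟨Mx, hMx⟩ : ∃ Mx, PySem.List.max? content (fun y => y) = some Mx := by
      cases hc : PySem.List.max? content (fun y => y) with
      | none => exact absurd ((PySem.List.max?_eq_none_iff _ _).1 hc) (by rintro h; rw [h] at hyc; simp at hyc)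
      | some Mx => exact ⟨Mx, rfl⟩
    have := PySem.List.max?_isMax hMx y hyc
    rw [hMdef, hMx]
    simpa using this
  have hpair' : (d ++ [p₂] ++ [p₁]).Pairwise (· ≤ ·) := by rw [← hss1]; exact hpair
  have hMmem' : M ∈ d ++ [p₂] ++ [p₁] := by rw [← hss1]; exact hMmem
  have hp₁M : p₁ = M := by
    have h1 : p₁ ≤ M := hMmax p₁ (by rw [hss1]; simp)
    have h2 : M ≤ p₁ := by
      have hp := List.pairwise_append.1 hpair'
      rcases List.mem_append.1 hMmem' with hy | hy
      · exact hp.2.2 M hy p₁ (by simp)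
      · have : M = p₁ := by simpa using hy
        omega
    omega
  have hMd : M ∈ d := by
    have hc2 : List.count M ss = List.count M (d ++ [p₂] ++ [p₁]) := by rw [hss1]
    rw [List.count_append, List.count_append] at hc2
    have hb1 : List.count M [p₂] ≤ 1 := List.count_le_length.trans (by simp)
    have hb2 : List.count M [p₁] ≤ 1 := List.count_le_length.trans (by simp)
    have hdc : 0 < List.count M d := by omega
    exact List.count_pos_iff.1 hdc
  -- gspec is all singletons
  have hG : gspec m ss = (d.map fun v => [v]) ++ [[p₂], [p₁]] := by
    rw [gspec_neg m hm ss hpair, hss1]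
    simp
  rw [hG]
  -- A's value ends with [p₁]
  have hA1 : PySem.List.pyGet? ((d.map fun v => [v]) ++ [[p₂], [p₁]]) (-1) = some [p₁] := by
    rw [show (d.map fun v => [v]) ++ [[p₂], [p₁]] = ((d.map fun v => [v]) ++ [[p₂]]) ++ [[p₁]] by simp]
    exact PySem.List.pyGet?_neg_one_append_singleton ..
  rw [hA1]
  dsimp only
  rw [if_pos (by simp)]
  rw [pyGet?_neg_two]
  dsimp only
  rw [PySem.List.pyGetD_zero_cons]
  have hlenG : ((d.map fun v => [v]) ++ [[p₂], [p₁]]).length = (d.map fun v => [v]).length + 2 := by simp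
  have hset : ((d.map fun v => [v]) ++ [[p₂], [p₁]]).set
      (((d.map fun v => [v]) ++ [[p₂], [p₁]]).length - 2) ([p₂] ++ [p₁]) =
      ((d.map fun v => [v]) ++ [[p₂, p₁]]) ++ [[p₁]] := by
    rw [hlenG]
    simp only [Nat.add_sub_cancel]
    rw [set_append_length]
    simp
  rw [hset]
  obtain ⟨r, hr, hrl⟩ := remove?_append_getLast? ((d.map fun v => [v]) ++ [[p₂, p₁]]) [[p₁]] [p₁]
    (List.mem_append_left _ (List.mem_map.2 ⟨M, hMd, by rw [hp₁M]⟩)) (by simp)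
  rw [hr]
  -- B's value ends with [p₂, p₁]
  rw [if_pos ?_]
  · intro heq
    have hlast := congrArg List.getLast? heq
    rw [hrl] at hlast
    rw [show (d.map fun v => [v]) ++ [[p₂], [p₁]] = ((d.map fun v => [v]) ++ [[p₂]]) ++ [[p₁]] by simp] at hlast
    rw [List.dropLast_concat, List.dropLast_concat, List.getLastD_concat, List.getLastD_concat] at hlast
    simp at hlast
  · constructor
    · simp
    · rw [show (d.map fun v => [v]) ++ [[p₂], [p₁]] = ((d.map fun v => [v]) ++ [[p₂]]) ++ [[p₁]] by simp,
        List.getLastD_concat]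
      simp
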